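-- pv_equiv track=rewrite | github.com/Kofiacheampong/learningpython | cs50/CourseProblems/plates.py | numbers_at_end
-- ===== SOURCE A (Python) =====
-- def numbers_at_end(s):
--     # Find the index of the first digit
--     num_start_idx = None
--     for i, c in enumerate(s):
--         if c.isdigit():
--             num_start_idx = i
--             break
--
--     # If no digits found, return True
--     if num_start_idx is None:
--         return True
--
--     # Check if all characters after the first digit are also digits
--     for c in s[num_start_idx:]:
--         if not c.isdigit():
--             return False
--
--     # Check if the first digit is not '0'
--     if s[num_start_idx] == '0':
--         return False
--
--     return True
-- ===== SOURCE B (Python) =====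
-- def numbers_at_end(s):
--     # Single pass: remember the first digit seen; any non-digit after it fails.
--     first = None
--     for c in s:
--         if c.isdigit():
--             if first is None:
--                 first = c
--         elif first is not None:
--             return False
--     if first is None:
--         return True
--     return first != '0'
-- ===== Notes on version B (the rewrite author's own statement) =====
-- stated objective: simpler
-- what changed: Replaces the find-index-then-slice-and-rescan two-phase structure by one pass that remembers the first digit seen and fails on a non-digit after it, avoiding the slice copy and the second scan.
import Mathlib
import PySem

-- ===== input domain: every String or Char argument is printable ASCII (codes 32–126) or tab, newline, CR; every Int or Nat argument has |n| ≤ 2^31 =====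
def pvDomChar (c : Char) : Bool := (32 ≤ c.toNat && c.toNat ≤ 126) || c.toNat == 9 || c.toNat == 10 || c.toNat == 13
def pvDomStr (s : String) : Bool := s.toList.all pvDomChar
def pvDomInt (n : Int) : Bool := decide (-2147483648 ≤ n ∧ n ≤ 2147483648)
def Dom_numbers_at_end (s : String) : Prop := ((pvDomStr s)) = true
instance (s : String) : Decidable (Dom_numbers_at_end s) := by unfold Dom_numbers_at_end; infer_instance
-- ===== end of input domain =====

-- B is a single pass remembering the first digit seen (simpler: no index/slice two-phase scan); same value as A.

-- ===== PORT A =====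
-- first loop of A: enumerate with break, returning the index of the first digit
def pvAFind (l : List Char) (i : Nat) : Option Nat :=
  match l with
  | [] => none
  | c :: cs => if PySem.Chars.isdigit c then some i else pvAFind cs (i + 1)

-- second loop of A: all characters of the slice are digits
def pvAAll (l : List Char) : Bool :=
  match l with
  | [] => true
  | c :: cs => if ¬ PySem.Chars.isdigit c then false else pvAAll cs

def numbers_at_end (s : String) : Bool :=
  match pvAFind s.toList 0 with
  | none => true
  | some i =>
    if pvAAll (PySem.List.slice s.toList (some (i : Int)) none) then
      if PySem.List.pyGet? s.toList (i : Int) == some '0' then false else true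
    else false

-- ===== PORT B =====
-- B's single loop: `first` is the first digit seen so far (none if none yet)
def pvBLoop (l : List Char) (first : Option Char) : Bool :=
  match l with
  | [] => match first with
          | none => true
          | some f => f != '0'
  | c :: cs =>
    if PySem.Chars.isdigit c then
      match first with
      | none => pvBLoop cs (some c)
      | some f => pvBLoop cs (some f)
    else
      match first with
      | none => pvBLoop cs none
      | some _ => false

def numbers_at_end_alt (s : String) : Bool := pvBLoop s.toList none

-- ===== PRECONDITION & SPEC =====
def Spec_numbers_at_end (s : String) (out : Bool) : Prop := out = numbers_at_end_alt s
instance (s : String) (out : Bool) : Decidable (Spec_numbers_at_end s out) := by unfold Spec_numbers_at_end; infer_instance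

-- ===== CLAIM (what is proved, stated in full; the proofs are below) =====
def Claim_equal_numbers_at_end : Prop := ∀ (s : String), Dom_numbers_at_end s → Spec_numbers_at_end s (numbers_at_end s)

-- ===== LEMMAS AND PROOFS =====

-- A's body, over a plain list (used only in the proof)
def pvAList (l : List Char) : Bool :=
  match pvAFind l 0 with
  | none => true
  | some i =>
    if pvAAll (PySem.List.slice l (some (i : Int)) none) then
      if PySem.List.pyGet? l (i : Int) == some '0' then false else true
    else false

theorem pvAFind_shift (l : List Char) (i : Nat) :
    pvAFind l i = (pvAFind l 0).map (· + i) := by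
  induction l generalizing i with
  | nil => simp [pvAFind]
  | cons c cs ih =>
    simp only [pvAFind]
    by_cases h : PySem.Chars.isdigit c
    · simp [h]
    · rw [if_neg h, if_neg h, ih (i + 1), ih 1, Option.map_map]
      cases pvAFind cs 0 <;> simp <;> try omega

theorem pvBLoop_some (l : List Char) (f : Char) :
    pvBLoop l (some f) = (pvAAll l && (f != '0')) := by
  induction l with
  | nil => simp [pvBLoop, pvAAll]
  | cons c cs ih =>
    by_cases h : PySem.Chars.isdigit c <;> simp [pvBLoop, pvAAll, h, ih]

theorem pvMain (l : List Char) : pvAList l = pvBLoop l none := by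
  induction l with
  | nil => simp [pvAList, pvAFind, pvBLoop]
  | cons c cs ih =>
    by_cases h : PySem.Chars.isdigit c
    · -- first digit is at index 0: A rescans the whole list and checks c = '0'
      simp only [pvAList, pvAFind, h, if_pos, pvBLoop]
      have hs : PySem.List.slice (c :: cs) (some ((0 : Nat) : Int)) none = c :: cs := by
        simp
      simp only [Nat.cast_zero] at hs ⊢
      rw [hs, pvBLoop_some]
      have hg : PySem.List.pyGet? (c :: cs) (0 : Int) = some c := by
        simp [PySem.List.pyGet?, PySem.List.pyIdx?]
      rw [hg]
      simp only [pvAAll, h, not_true]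
      by_cases hc : c = '0' <;> simp [hc]
    · -- c is not a digit: both sides reduce to the tail
      simp only [pvAList, pvAFind, pvBLoop]
      rw [if_neg h, if_neg h, pvAFind_shift cs 1]
      cases hf : pvAFind cs 0 with
      | none => simpa [pvAList, hf] using ih
      | some i =>
        simp only [Option.map_some]
        have hs : PySem.List.slice (c :: cs) (some ((i + 1 : Nat) : Int)) none
            = PySem.List.slice cs (some ((i : Nat) : Int)) none := by
          rw [PySem.List.slice_from_natCast, PySem.List.slice_from_natCast]
          rfl
        have hg : PySem.List.pyGet? (c :: cs) ((i + 1 : Nat) : Int)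
            = PySem.List.pyGet? cs ((i : Nat) : Int) := by
          simp
        rw [hs, hg]
        simpa [pvAList, hf] using ih

-- ===== VERDICT (by name: the statement is the Claim_ definition above) =====
theorem numbers_at_end_spec : Claim_equal_numbers_at_end := by
  intro s _
  show numbers_at_end s = numbers_at_end_alt s
  simpa [numbers_at_end, numbers_at_end_alt, pvAList] using pvMain s.toList
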